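-- pv_equiv track=rewrite | github.com/T-B-F/pyBioUtils | BioUtils/core/BUseq.py | compute_offset_pos
-- ===== SOURCE A (Python) =====
-- msa_characters = ["-", "?", "!", "*", "."]
--
-- def transform_seq(seq):
--     """ replace all characters that are not part of a protein sequence by
--     emptiness
--     """
--     # TODO add character checking based on ASCII code
--     return "".join("" if aa in msa_characters else aa for aa in seq)
--
-- def compute_offset_pos(seq, pos):
--     """ from a sequence without gap position, computes the corresponding position in a MSA
--
--     Parameters
--     ==========
--     seq : string
--         the sequence from the MSA
--     pos : int
--         the position to convert
--
--     Return
--     ======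
--     k : int
--         the position in the MSA
--     """
--
--     nogap_seq = transform_seq(seq)
--     assert(pos >= 0 and pos < len(nogap_seq))
--
--     maps = dict()
--     cnt = 0
--     maxi = 0
--     for i in range(len(seq)):
--         if seq[i] not in msa_characters:
--             maps[i-cnt] = i
--             maxi = i
--         else:
--             cnt += 1
--     return maps.get(pos, maxi)
-- ===== SOURCE B (Python) =====
-- msa_characters = ["-", "?", "!", "*", "."]
--
-- def transform_seq(seq):
--     return "".join("" if aa in msa_characters else aa for aa in seq)
--
-- def compute_offset_pos(seq, pos):
--     nogap_seq = transform_seq(seq)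
--     assert(pos >= 0 and pos < len(nogap_seq))
--     cnt = 0
--     for i, aa in enumerate(seq):
--         if aa not in msa_characters:
--             if cnt == pos:
--                 return i
--             cnt += 1
-- ===== Notes on version B (the rewrite author's own statement) =====
-- stated objective: simpler
-- what changed: Instead of building a full position-to-index dict over the whole sequence plus a maxi fallback and then looking up, B scans the sequence once with a counter of non-gap characters and returns the current index as soon as the counter reaches pos (early exit, no table).
import Mathlib
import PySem

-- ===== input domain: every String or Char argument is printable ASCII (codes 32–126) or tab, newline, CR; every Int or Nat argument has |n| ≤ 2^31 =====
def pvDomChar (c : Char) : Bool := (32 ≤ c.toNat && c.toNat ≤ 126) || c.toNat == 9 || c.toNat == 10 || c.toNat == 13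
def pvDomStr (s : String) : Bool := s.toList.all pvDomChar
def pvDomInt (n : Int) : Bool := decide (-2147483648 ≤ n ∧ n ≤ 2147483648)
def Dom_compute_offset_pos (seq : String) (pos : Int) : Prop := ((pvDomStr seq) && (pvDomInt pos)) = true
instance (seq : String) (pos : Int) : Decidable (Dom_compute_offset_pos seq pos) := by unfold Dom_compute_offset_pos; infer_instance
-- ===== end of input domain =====

-- B replaces A's "build a full position→MSA-index dict plus a maxi fallback, then look up"
-- with a single early-exit scan that counts non-gap characters and returns the index where
-- the count reaches pos (objective: simpler; no table, no fallback).

-- ===== PORT A =====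
def msa_characters : List Char := ['-', '?', '!', '*', '.']

def transform_seq (seq : String) : String :=
  String.ofList (seq.toList.filter (fun aa => !msa_characters.contains aa))

-- the loop `for i in range(len(seq))` over characters seq[i], state (maps, cnt, maxi)
def aGo : List Char → Int → PySem.Dict Int Int × Int × Int → PySem.Dict Int Int × Int × Int
  | [], _, st => st
  | c :: rest, i, (maps, cnt, maxi) =>
    if !msa_characters.contains c then
      aGo rest (i + 1) (maps.insert (i - cnt) i, cnt, i)
    else
      aGo rest (i + 1) (maps, cnt + 1, maxi)

-- the `assert(pos >= 0 and pos < len(nogap_seq))` raises exactly outside Pre_ below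
def compute_offset_pos (seq : String) (pos : Int) : Int :=
  let _nogap_seq := transform_seq seq
  let st := aGo seq.toList 0 (PySem.Dict.empty, 0, 0)
  st.1.getD pos st.2.2

-- ===== PORT B =====
-- single pass with a counter of non-gap characters; early return at counter = pos
def bGo : List Char → Int → Int → Int → Int
  | [], _, _, _ => 0   -- unreachable under the assert (pos < number of non-gap chars)
  | aa :: rest, i, cnt, pos =>
    if !msa_characters.contains aa then
      if cnt = pos then i else bGo rest (i + 1) (cnt + 1) pos
    else
      bGo rest (i + 1) cnt pos

def compute_offset_pos_alt (seq : String) (pos : Int) : Int :=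
  let _nogap_seq := transform_seq seq
  bGo seq.toList 0 0 pos

-- ===== PRECONDITION & SPEC =====
-- Pre_ excludes exactly the inputs where the Python assert fails (AssertionError in both A and B):
-- pos must be a valid position of the ungapped sequence.
def Pre_compute_offset_pos (seq : String) (pos : Int) : Prop :=
  0 ≤ pos ∧ pos < ((seq.toList.filter (fun aa => !msa_characters.contains aa)).length : Int)
instance (seq : String) (pos : Int) : Decidable (Pre_compute_offset_pos seq pos) := by
  unfold Pre_compute_offset_pos; infer_instance

def pvWitness_compute_offset_pos : String × Int := ("AB-C", 2)

def Spec_compute_offset_pos (seq : String) (pos : Int) (out : Int) : Prop := out = compute_offset_pos_alt seq pos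
instance (seq : String) (pos : Int) (out : Int) : Decidable (Spec_compute_offset_pos seq pos out) := by unfold Spec_compute_offset_pos; infer_instance

-- ===== CLAIM (what is proved, stated in full; the proofs are below) =====
def Claim_equal_compute_offset_pos : Prop := ∀ (seq : String) (pos : Int), Dom_compute_offset_pos seq pos → Pre_compute_offset_pos seq pos → Spec_compute_offset_pos seq pos (compute_offset_pos seq pos)

-- ===== LEMMAS AND PROOFS =====

-- keys inserted from index i on are ≥ i - cnt, so a smaller key's binding is untouched
lemma aGo_preserve (cs : List Char) : ∀ (i cnt : Int) (maps : PySem.Dict Int Int) (maxi pos : Int),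
    pos < i - cnt → ((aGo cs i (maps, cnt, maxi)).1).get? pos = maps.get? pos := by
  induction cs with
  | nil => intro i cnt maps maxi pos _; rfl
  | cons c rest ih =>
    intro i cnt maps maxi pos h
    by_cases hc : c ∈ msa_characters
    · simp only [aGo, List.contains_eq_mem, hc, decide_true, Bool.not_true, Bool.false_eq_true,
        if_false]
      exact ih (i + 1) (cnt + 1) maps maxi pos (by omega)
    · simp only [aGo, List.contains_eq_mem, hc, decide_false, Bool.not_false, if_true]
      rw [ih (i + 1) cnt _ _ pos (by omega)]
      exact PySem.Dict.get?_insert_of_ne _ _ (by omega)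

-- the core invariant: with pos not yet bound and i - cnt ≤ pos < i - cnt + #nongap(cs),
-- A's lookup-with-fallback equals B's early-exit scan (bGo's counter being i - cnt)
lemma aGo_eq_bGo (cs : List Char) : ∀ (i cnt : Int) (maps : PySem.Dict Int Int) (maxi pos : Int),
    maps.get? pos = none → i - cnt ≤ pos →
    pos < i - cnt + ((cs.filter (fun aa => !msa_characters.contains aa)).length : Int) →
    ((aGo cs i (maps, cnt, maxi)).1).getD pos ((aGo cs i (maps, cnt, maxi)).2.2)
      = bGo cs i (i - cnt) pos := by
  induction cs with
  | nil => intro i cnt maps maxi pos _ h1 h2; simp at h2; omega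
  | cons c rest ih =>
    intro i cnt maps maxi pos hnone h1 h2
    by_cases hc : c ∈ msa_characters
    · rw [List.filter_cons_of_neg (by simp [hc])] at h2
      simp only [aGo, bGo, List.contains_eq_mem, hc, decide_true, Bool.not_true,
        Bool.false_eq_true, if_false]
      have := ih (i + 1) (cnt + 1) maps maxi pos hnone (by omega) (by omega)
      rw [show i + 1 - (cnt + 1) = i - cnt by ring] at this
      exact this
    · rw [List.filter_cons_of_pos (by simp [hc])] at h2
      simp only [List.length_cons, Nat.cast_add, Nat.cast_one] at h2
      simp only [aGo, bGo, List.contains_eq_mem, hc, decide_false, Bool.not_false, if_true]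
      by_cases hp : i - cnt = pos
      · simp only [hp, if_true]
        have hg : ((aGo rest (i + 1) (maps.insert (i - cnt) i, cnt, i)).1).get? pos
            = some i := by
          rw [aGo_preserve rest (i + 1) cnt _ _ pos (by omega), hp,
            PySem.Dict.get?_insert_self]
        rw [hp] at hg
        rw [PySem.Dict.getD_eq_get?_getD, hg]; rfl
      · simp only [hp, if_false]
        have hnone' : (maps.insert (i - cnt) i).get? pos = none := by
          rw [PySem.Dict.get?_insert_of_ne _ _ (by omega)]; exact hnone
        have := ih (i + 1) cnt (maps.insert (i - cnt) i) i pos hnone' (by omega) (by omega)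
        rw [show i + 1 - cnt = i - cnt + 1 by ring] at this
        exact this

-- ===== VERDICT (by name: the statement is the Claim_ definition above) =====
theorem compute_offset_pos_spec : Claim_equal_compute_offset_pos := by
  intro seq pos _ hpre
  obtain ⟨h0, hlt⟩ := hpre
  unfold Spec_compute_offset_pos compute_offset_pos compute_offset_pos_alt
  have := aGo_eq_bGo seq.toList 0 0 PySem.Dict.empty 0 pos
    (PySem.Dict.get?_empty pos) (by omega) (by simpa using hlt)
  simpa using this
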